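-- pv_equiv track=rewrite | github.com/Nidhishree1209/Multimodal-Analysis-System | src/hand/hand_detector.py | _states_are_similar
-- ===== SOURCE A (Python) =====
-- def _states_are_similar(actual: str, expected: str) -> bool:
--     """
--     Check if two finger states are similar enough to be a partial match.
--
--     This allows for graceful degradation when detection is close but not exact.
--
--     Args:
--         actual: Detected finger state.
--         expected: Expected finger state from rules.
--
--     Returns:
--         bool: True if states are similar.
--     """
--     if actual == expected:
--         return True
--
--     # Define similarity groups - states that are conceptually similar
--     similarity_groups = [
--         # Straight variants
--         ['straight', 'straight_spread', 'straight_angled_out', 'stretched_out'],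
--         # Bent variants
--         ['bent', 'slightly_bent', 'bent_forward', 'bent_forward_separated'],
--         # Folded variants
--         ['folded', 'folded_over_fingers'],
--         # Curved
--         ['curved'],
--         # Touching states - thumb touching finger
--         ['touching_thumb', 'touching_index', 'touching_middle', 'touching_ring', 'touching_pinky'],
--         # Multiple finger touching
--         ['touching_index_and_middle', 'touching_middle_and_ring', 'touching_ring_and_pinky',
--          'touching_middle_ring_pinky', 'touching_all_fingertips', 'touching_base_of_ring'],
--     ]
--
--     for group in similarity_groups:
--         if actual in group and expected in group:
--             return True
--     return False
-- ===== SOURCE B (Python) =====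
-- # Single dict mapping each known state to its group id; two O(1) lookups replace the scan over group lists.
-- _GROUPS = [
--     ['straight', 'straight_spread', 'straight_angled_out', 'stretched_out'],
--     ['bent', 'slightly_bent', 'bent_forward', 'bent_forward_separated'],
--     ['folded', 'folded_over_fingers'],
--     ['curved'],
--     ['touching_thumb', 'touching_index', 'touching_middle', 'touching_ring', 'touching_pinky'],
--     ['touching_index_and_middle', 'touching_middle_and_ring', 'touching_ring_and_pinky',
--      'touching_middle_ring_pinky', 'touching_all_fingertips', 'touching_base_of_ring'],
-- ]
-- STATE_GROUP = {state: i for i, group in enumerate(_GROUPS) for state in group}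
--
-- def _states_are_similar(actual: str, expected: str) -> bool:
--     if actual == expected:
--         return True
--     ga = STATE_GROUP.get(actual)
--     return ga is not None and ga == STATE_GROUP.get(expected)
-- ===== Notes on version B (the rewrite author's own statement) =====
-- stated objective: simpler
-- what changed: Replaces the per-call scan over six similarity-group lists with a module-level dict mapping each state to its group id, so the check is the equality guard plus two dict lookups compared for a shared non-None group id.
import Mathlib
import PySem

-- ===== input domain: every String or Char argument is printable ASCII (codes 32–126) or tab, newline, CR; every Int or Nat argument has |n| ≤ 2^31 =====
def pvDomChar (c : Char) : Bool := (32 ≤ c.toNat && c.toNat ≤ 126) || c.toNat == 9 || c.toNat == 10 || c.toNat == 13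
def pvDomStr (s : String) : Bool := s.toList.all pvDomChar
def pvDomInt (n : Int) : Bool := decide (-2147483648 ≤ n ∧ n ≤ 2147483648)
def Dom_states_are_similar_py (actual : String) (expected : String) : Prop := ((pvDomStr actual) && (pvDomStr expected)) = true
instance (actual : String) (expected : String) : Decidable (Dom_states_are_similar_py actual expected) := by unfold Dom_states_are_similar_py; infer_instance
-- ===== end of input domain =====

-- B replaces A's per-call scan over the six similarity-group lists by one precomputed state→group-id dict and two lookups (simpler call path; same value everywhere).

-- ===== PORT A =====
-- the literal similarity_groups list from A's body
def pvSimilarityGroups : List (List String) :=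
  [ ["straight", "straight_spread", "straight_angled_out", "stretched_out"],
    ["bent", "slightly_bent", "bent_forward", "bent_forward_separated"],
    ["folded", "folded_over_fingers"],
    ["curved"],
    ["touching_thumb", "touching_index", "touching_middle", "touching_ring", "touching_pinky"],
    ["touching_index_and_middle", "touching_middle_and_ring", "touching_ring_and_pinky",
     "touching_middle_ring_pinky", "touching_all_fingertips", "touching_base_of_ring"] ]

-- 'for group in similarity_groups: if actual in group and expected in group: return True' then 'return False'
def pvLoopA (actual : String) (expected : String) : List (List String) → Bool
  | [] => false
  | g :: rest =>
      if g.contains actual && g.contains expected then true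
      else pvLoopA actual expected rest

def states_are_similar_py (actual : String) (expected : String) : Bool :=
  if actual == expected then true
  else pvLoopA actual expected pvSimilarityGroups

-- ===== PORT B =====
-- STATE_GROUP = {state: i for i, group in enumerate(_GROUPS) for state in group}
def pvStateGroup : PySem.Dict String Int :=
  PySem.Dict.ofList
    ((PySem.List.enumerate pvSimilarityGroups 0).flatMap (fun p => p.2.map (fun s => (s, p.1))))

-- 'if actual == expected: return True; ga = STATE_GROUP.get(actual); return ga is not None and ga == STATE_GROUP.get(expected)'
def states_are_similar_py_alt (actual : String) (expected : String) : Bool :=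
  if actual == expected then true
  else
    match PySem.Dict.get? pvStateGroup actual with
    | none => false
    | some ga => some ga == PySem.Dict.get? pvStateGroup expected

-- ===== PRECONDITION & SPEC =====
def Spec_states_are_similar_py (actual : String) (expected : String) (out : Bool) : Prop := out = states_are_similar_py_alt actual expected
instance (actual : String) (expected : String) (out : Bool) : Decidable (Spec_states_are_similar_py actual expected out) := by unfold Spec_states_are_similar_py; infer_instance

-- ===== CLAIM (what is proved, stated in full; the proofs are below) =====
def Claim_equal_states_are_similar_py : Prop := ∀ (actual : String) (expected : String), Dom_states_are_similar_py actual expected → Spec_states_are_similar_py actual expected (states_are_similar_py actual expected)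

-- ===== LEMMAS AND PROOFS =====

-- B's dict lookup, written as the first-group-containing-s chain
def pvBIdx (s : String) : Option Int :=
  if pvSimilarityGroups[0]!.contains s then some 0
  else if pvSimilarityGroups[1]!.contains s then some 1
  else if pvSimilarityGroups[2]!.contains s then some 2
  else if pvSimilarityGroups[3]!.contains s then some 3
  else if pvSimilarityGroups[4]!.contains s then some 4
  else if pvSimilarityGroups[5]!.contains s then some 5
  else none

-- at most one of the six membership flags is set (the groups are pairwise disjoint)
def pvAMO (c0 c1 c2 c3 c4 c5 : Bool) : Bool :=
  decide (c0.toNat + c1.toNat + c2.toNat + c3.toNat + c4.toNat + c5.toNat ≤ 1)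

theorem pvStateGroup_literal : pvStateGroup = PySem.Dict.mk [("straight", 0), ("straight_spread", 0), ("straight_angled_out", 0), ("stretched_out", 0), ("bent", 1), ("slightly_bent", 1), ("bent_forward", 1), ("bent_forward_separated", 1), ("folded", 2), ("folded_over_fingers", 2), ("curved", 3), ("touching_thumb", 4), ("touching_index", 4), ("touching_middle", 4), ("touching_ring", 4), ("touching_pinky", 4), ("touching_index_and_middle", 5), ("touching_middle_and_ring", 5), ("touching_ring_and_pinky", 5), ("touching_middle_ring_pinky", 5), ("touching_all_fingertips", 5), ("touching_base_of_ring", 5)] := by decide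

set_option maxHeartbeats 2000000 in
theorem pvGet_eq_bIdx (s : String) : PySem.Dict.get? pvStateGroup s = pvBIdx s := by
  rw [pvStateGroup_literal]
  by_cases h0 : s = "straight"
  · subst h0; decide
  by_cases h1 : s = "straight_spread"
  · subst h1; decide
  by_cases h2 : s = "straight_angled_out"
  · subst h2; decide
  by_cases h3 : s = "stretched_out"
  · subst h3; decide
  by_cases h4 : s = "bent"
  · subst h4; decide
  by_cases h5 : s = "slightly_bent"
  · subst h5; decide
  by_cases h6 : s = "bent_forward"
  · subst h6; decide
  by_cases h7 : s = "bent_forward_separated"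
  · subst h7; decide
  by_cases h8 : s = "folded"
  · subst h8; decide
  by_cases h9 : s = "folded_over_fingers"
  · subst h9; decide
  by_cases h10 : s = "curved"
  · subst h10; decide
  by_cases h11 : s = "touching_thumb"
  · subst h11; decide
  by_cases h12 : s = "touching_index"
  · subst h12; decide
  by_cases h13 : s = "touching_middle"
  · subst h13; decide
  by_cases h14 : s = "touching_ring"
  · subst h14; decide
  by_cases h15 : s = "touching_pinky"
  · subst h15; decide
  by_cases h16 : s = "touching_index_and_middle"
  · subst h16; decide
  by_cases h17 : s = "touching_middle_and_ring"
  · subst h17; decide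
  by_cases h18 : s = "touching_ring_and_pinky"
  · subst h18; decide
  by_cases h19 : s = "touching_middle_ring_pinky"
  · subst h19; decide
  by_cases h20 : s = "touching_all_fingertips"
  · subst h20; decide
  by_cases h21 : s = "touching_base_of_ring"
  · subst h21; decide
  simp only [pvBIdx, pvSimilarityGroups, PySem.Dict.get?_mk_cons, List.contains_cons, List.contains_nil, Bool.or_false,
    List.getElem!_cons_zero, List.getElem!_cons_succ,
    (show (("straight":String) == s) = false from beq_eq_false_iff_ne.mpr (fun he => h0 he.symm)),
    (show (s == ("straight":String)) = false from beq_eq_false_iff_ne.mpr h0),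
    (show (("straight_spread":String) == s) = false from beq_eq_false_iff_ne.mpr (fun he => h1 he.symm)),
    (show (s == ("straight_spread":String)) = false from beq_eq_false_iff_ne.mpr h1),
    (show (("straight_angled_out":String) == s) = false from beq_eq_false_iff_ne.mpr (fun he => h2 he.symm)),
    (show (s == ("straight_angled_out":String)) = false from beq_eq_false_iff_ne.mpr h2),
    (show (("stretched_out":String) == s) = false from beq_eq_false_iff_ne.mpr (fun he => h3 he.symm)),
    (show (s == ("stretched_out":String)) = false from beq_eq_false_iff_ne.mpr h3),
    (show (("bent":String) == s) = false from beq_eq_false_iff_ne.mpr (fun he => h4 he.symm)),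
    (show (s == ("bent":String)) = false from beq_eq_false_iff_ne.mpr h4),
    (show (("slightly_bent":String) == s) = false from beq_eq_false_iff_ne.mpr (fun he => h5 he.symm)),
    (show (s == ("slightly_bent":String)) = false from beq_eq_false_iff_ne.mpr h5),
    (show (("bent_forward":String) == s) = false from beq_eq_false_iff_ne.mpr (fun he => h6 he.symm)),
    (show (s == ("bent_forward":String)) = false from beq_eq_false_iff_ne.mpr h6),
    (show (("bent_forward_separated":String) == s) = false from beq_eq_false_iff_ne.mpr (fun he => h7 he.symm)),
    (show (s == ("bent_forward_separated":String)) = false from beq_eq_false_iff_ne.mpr h7),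
    (show (("folded":String) == s) = false from beq_eq_false_iff_ne.mpr (fun he => h8 he.symm)),
    (show (s == ("folded":String)) = false from beq_eq_false_iff_ne.mpr h8),
    (show (("folded_over_fingers":String) == s) = false from beq_eq_false_iff_ne.mpr (fun he => h9 he.symm)),
    (show (s == ("folded_over_fingers":String)) = false from beq_eq_false_iff_ne.mpr h9),
    (show (("curved":String) == s) = false from beq_eq_false_iff_ne.mpr (fun he => h10 he.symm)),
    (show (s == ("curved":String)) = false from beq_eq_false_iff_ne.mpr h10),
    (show (("touching_thumb":String) == s) = false from beq_eq_false_iff_ne.mpr (fun he => h11 he.symm)),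
    (show (s == ("touching_thumb":String)) = false from beq_eq_false_iff_ne.mpr h11),
    (show (("touching_index":String) == s) = false from beq_eq_false_iff_ne.mpr (fun he => h12 he.symm)),
    (show (s == ("touching_index":String)) = false from beq_eq_false_iff_ne.mpr h12),
    (show (("touching_middle":String) == s) = false from beq_eq_false_iff_ne.mpr (fun he => h13 he.symm)),
    (show (s == ("touching_middle":String)) = false from beq_eq_false_iff_ne.mpr h13),
    (show (("touching_ring":String) == s) = false from beq_eq_false_iff_ne.mpr (fun he => h14 he.symm)),
    (show (s == ("touching_ring":String)) = false from beq_eq_false_iff_ne.mpr h14),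
    (show (("touching_pinky":String) == s) = false from beq_eq_false_iff_ne.mpr (fun he => h15 he.symm)),
    (show (s == ("touching_pinky":String)) = false from beq_eq_false_iff_ne.mpr h15),
    (show (("touching_index_and_middle":String) == s) = false from beq_eq_false_iff_ne.mpr (fun he => h16 he.symm)),
    (show (s == ("touching_index_and_middle":String)) = false from beq_eq_false_iff_ne.mpr h16),
    (show (("touching_middle_and_ring":String) == s) = false from beq_eq_false_iff_ne.mpr (fun he => h17 he.symm)),
    (show (s == ("touching_middle_and_ring":String)) = false from beq_eq_false_iff_ne.mpr h17),
    (show (("touching_ring_and_pinky":String) == s) = false from beq_eq_false_iff_ne.mpr (fun he => h18 he.symm)),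
    (show (s == ("touching_ring_and_pinky":String)) = false from beq_eq_false_iff_ne.mpr h18),
    (show (("touching_middle_ring_pinky":String) == s) = false from beq_eq_false_iff_ne.mpr (fun he => h19 he.symm)),
    (show (s == ("touching_middle_ring_pinky":String)) = false from beq_eq_false_iff_ne.mpr h19),
    (show (("touching_all_fingertips":String) == s) = false from beq_eq_false_iff_ne.mpr (fun he => h20 he.symm)),
    (show (s == ("touching_all_fingertips":String)) = false from beq_eq_false_iff_ne.mpr h20),
    (show (("touching_base_of_ring":String) == s) = false from beq_eq_false_iff_ne.mpr (fun he => h21 he.symm)),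
    (show (s == ("touching_base_of_ring":String)) = false from beq_eq_false_iff_ne.mpr h21)]
  simp [PySem.Dict.get?]

set_option maxHeartbeats 2000000 in
theorem pvAMO_groups (s : String) :
    pvAMO (pvSimilarityGroups[0]!.contains s) (pvSimilarityGroups[1]!.contains s)
      (pvSimilarityGroups[2]!.contains s) (pvSimilarityGroups[3]!.contains s)
      (pvSimilarityGroups[4]!.contains s) (pvSimilarityGroups[5]!.contains s) = true := by
  by_cases h0 : s = "straight"
  · subst h0; decide
  by_cases h1 : s = "straight_spread"
  · subst h1; decide
  by_cases h2 : s = "straight_angled_out"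
  · subst h2; decide
  by_cases h3 : s = "stretched_out"
  · subst h3; decide
  by_cases h4 : s = "bent"
  · subst h4; decide
  by_cases h5 : s = "slightly_bent"
  · subst h5; decide
  by_cases h6 : s = "bent_forward"
  · subst h6; decide
  by_cases h7 : s = "bent_forward_separated"
  · subst h7; decide
  by_cases h8 : s = "folded"
  · subst h8; decide
  by_cases h9 : s = "folded_over_fingers"
  · subst h9; decide
  by_cases h10 : s = "curved"
  · subst h10; decide
  by_cases h11 : s = "touching_thumb"
  · subst h11; decide
  by_cases h12 : s = "touching_index"
  · subst h12; decide
  by_cases h13 : s = "touching_middle"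
  · subst h13; decide
  by_cases h14 : s = "touching_ring"
  · subst h14; decide
  by_cases h15 : s = "touching_pinky"
  · subst h15; decide
  by_cases h16 : s = "touching_index_and_middle"
  · subst h16; decide
  by_cases h17 : s = "touching_middle_and_ring"
  · subst h17; decide
  by_cases h18 : s = "touching_ring_and_pinky"
  · subst h18; decide
  by_cases h19 : s = "touching_middle_ring_pinky"
  · subst h19; decide
  by_cases h20 : s = "touching_all_fingertips"
  · subst h20; decide
  by_cases h21 : s = "touching_base_of_ring"
  · subst h21; decide
  simp only [pvSimilarityGroups, List.contains_cons, List.contains_nil, Bool.or_false,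
    List.getElem!_cons_zero, List.getElem!_cons_succ,
    (show (s == ("straight":String)) = false from beq_eq_false_iff_ne.mpr h0),
    (show (s == ("straight_spread":String)) = false from beq_eq_false_iff_ne.mpr h1),
    (show (s == ("straight_angled_out":String)) = false from beq_eq_false_iff_ne.mpr h2),
    (show (s == ("stretched_out":String)) = false from beq_eq_false_iff_ne.mpr h3),
    (show (s == ("bent":String)) = false from beq_eq_false_iff_ne.mpr h4),
    (show (s == ("slightly_bent":String)) = false from beq_eq_false_iff_ne.mpr h5),
    (show (s == ("bent_forward":String)) = false from beq_eq_false_iff_ne.mpr h6),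
    (show (s == ("bent_forward_separated":String)) = false from beq_eq_false_iff_ne.mpr h7),
    (show (s == ("folded":String)) = false from beq_eq_false_iff_ne.mpr h8),
    (show (s == ("folded_over_fingers":String)) = false from beq_eq_false_iff_ne.mpr h9),
    (show (s == ("curved":String)) = false from beq_eq_false_iff_ne.mpr h10),
    (show (s == ("touching_thumb":String)) = false from beq_eq_false_iff_ne.mpr h11),
    (show (s == ("touching_index":String)) = false from beq_eq_false_iff_ne.mpr h12),
    (show (s == ("touching_middle":String)) = false from beq_eq_false_iff_ne.mpr h13),
    (show (s == ("touching_ring":String)) = false from beq_eq_false_iff_ne.mpr h14),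
    (show (s == ("touching_pinky":String)) = false from beq_eq_false_iff_ne.mpr h15),
    (show (s == ("touching_index_and_middle":String)) = false from beq_eq_false_iff_ne.mpr h16),
    (show (s == ("touching_middle_and_ring":String)) = false from beq_eq_false_iff_ne.mpr h17),
    (show (s == ("touching_ring_and_pinky":String)) = false from beq_eq_false_iff_ne.mpr h18),
    (show (s == ("touching_middle_ring_pinky":String)) = false from beq_eq_false_iff_ne.mpr h19),
    (show (s == ("touching_all_fingertips":String)) = false from beq_eq_false_iff_ne.mpr h20),
    (show (s == ("touching_base_of_ring":String)) = false from beq_eq_false_iff_ne.mpr h21)]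
  decide

-- the pure boolean shape of 'scan the groups' vs 'compare first-group ids', under disjointness of each key's flags
theorem pvBoolShape : ∀ (c0a c1a c2a c3a c4a c5a c0e c1e c2e c3e c4e c5e : Bool),
    pvAMO c0a c1a c2a c3a c4a c5a = true → pvAMO c0e c1e c2e c3e c4e c5e = true →
    (if c0a && c0e then true else if c1a && c1e then true else if c2a && c2e then true
     else if c3a && c3e then true else if c4a && c4e then true else if c5a && c5e then true else false)
    = (match (if c0a then some (0:Int) else if c1a then some 1 else if c2a then some 2
              else if c3a then some 3 else if c4a then some 4 else if c5a then some 5 else none) with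
       | none => false
       | some ga => some ga == (if c0e then some (0:Int) else if c1e then some 1 else if c2e then some 2
              else if c3e then some 3 else if c4e then some 4 else if c5e then some 5 else none)) := by
  decide

theorem pvLoop_eq (a e : String) :
    pvLoopA a e pvSimilarityGroups =
      (match pvBIdx a with
       | none => false
       | some ga => some ga == pvBIdx e) := by
  have h := pvBoolShape
    (pvSimilarityGroups[0]!.contains a) (pvSimilarityGroups[1]!.contains a)
    (pvSimilarityGroups[2]!.contains a) (pvSimilarityGroups[3]!.contains a)
    (pvSimilarityGroups[4]!.contains a) (pvSimilarityGroups[5]!.contains a)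
    (pvSimilarityGroups[0]!.contains e) (pvSimilarityGroups[1]!.contains e)
    (pvSimilarityGroups[2]!.contains e) (pvSimilarityGroups[3]!.contains e)
    (pvSimilarityGroups[4]!.contains e) (pvSimilarityGroups[5]!.contains e)
    (pvAMO_groups a) (pvAMO_groups e)
  simp only [pvSimilarityGroups, List.getElem!_cons_zero, List.getElem!_cons_succ] at h
  simp only [pvLoopA, pvSimilarityGroups, pvBIdx, List.getElem!_cons_zero, List.getElem!_cons_succ]
  exact h

theorem pvMain (actual expected : String) :
    states_are_similar_py actual expected = states_are_similar_py_alt actual expected := by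
  unfold states_are_similar_py states_are_similar_py_alt
  by_cases h : actual == expected
  · simp [h]
  · simp only [h, Bool.false_eq_true, if_false]
    rw [pvGet_eq_bIdx, pvGet_eq_bIdx]
    exact pvLoop_eq actual expected

-- ===== VERDICT (by name: the statement is the Claim_ definition above) =====
theorem states_are_similar_py_spec : Claim_equal_states_are_similar_py := by
  intro actual expected _
  unfold Spec_states_are_similar_py
  exact pvMain actual expected
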